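-- pv_equiv track=rewrite | github.com/Ayra-Minal/python-programming | random/left_right_same.py | find_minimum_moves
-- ===== SOURCE A (Python) =====
-- def find_minimum_moves(word):
--     moves = 0
--     freq = {}
--
--     # Count frequency of each character
--     for ch in word:
--         freq[ch] = freq.get(ch, 0) + 1
--
--     # For each character, every pair can be removed in one move
--     for count in freq.values():
--         moves += count // 2
--
--     return moves
-- ===== SOURCE B (Python) =====
-- def find_minimum_moves(word):
--     odd = set()
--     for ch in word:
--         if ch in odd:
--             odd.discard(ch)
--         else:
--             odd.add(ch)
--     return (len(word) - len(odd)) // 2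
-- ===== Notes on version B (the rewrite author's own statement) =====
-- stated objective: alternative
-- what changed: Replaces the frequency dictionary plus a second pass summing count//2 by a single pass maintaining a parity set (characters seen an odd number of times), returning (len(word) - len(odd_set)) // 2.
import Mathlib
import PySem

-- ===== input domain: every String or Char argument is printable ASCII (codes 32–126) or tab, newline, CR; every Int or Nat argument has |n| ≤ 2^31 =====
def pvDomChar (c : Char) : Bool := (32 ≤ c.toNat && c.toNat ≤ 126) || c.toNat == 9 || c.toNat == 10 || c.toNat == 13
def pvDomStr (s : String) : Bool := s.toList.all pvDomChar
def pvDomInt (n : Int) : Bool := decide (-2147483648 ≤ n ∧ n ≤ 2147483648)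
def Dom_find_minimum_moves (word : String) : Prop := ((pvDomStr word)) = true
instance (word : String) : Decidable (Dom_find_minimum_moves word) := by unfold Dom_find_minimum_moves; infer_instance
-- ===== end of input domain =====

-- B replaces the frequency-dict + sum of count//2 by a one-pass parity set and the identity
-- (len(word) - #odd-count chars) // 2; alternative decomposition, same cost.

-- ===== PORT A =====
def find_minimum_moves (word : String) : Int :=
  let freq := word.toList.foldl
    (fun d ch => d.insert ch (d.getD ch 0 + 1)) (PySem.Dict.empty : PySem.Dict Char Int)
  freq.values.foldl (fun moves count => moves + PySem.Int.floordiv count 2) 0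

-- ===== PORT B =====
def find_minimum_moves_alt (word : String) : Int :=
  let odd := word.toList.foldl
    (fun s ch => if PySem.Set.contains s ch then PySem.Set.discard s ch else PySem.Set.add s ch)
    ([] : PySem.Set Char)
  PySem.Int.floordiv (PySem.Str.len word - PySem.Set.len odd) 2

-- ===== PRECONDITION & SPEC =====
def Spec_find_minimum_moves (word : String) (out : Int) : Prop := out = find_minimum_moves_alt word
instance (word : String) (out : Int) : Decidable (Spec_find_minimum_moves word out) := by unfold Spec_find_minimum_moves; infer_instance

-- ===== CLAIM (what is proved, stated in full; the proofs are below) =====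
def Claim_equal_find_minimum_moves : Prop := ∀ (word : String), Dom_find_minimum_moves word → Spec_find_minimum_moves word (find_minimum_moves word)

-- ===== LEMMAS AND PROOFS =====

-- B's parity-set loop: starting from a nodup set s, the result is nodup and contains x
-- iff membership in s flipped an odd number of times (= count of x in l is odd).
theorem pv_toggle_fold (l : List Char) : ∀ (s : PySem.Set Char), s.Nodup →
    (l.foldl (fun s ch => if PySem.Set.contains s ch then PySem.Set.discard s ch else PySem.Set.add s ch) s).Nodup ∧
    ∀ x, x ∈ l.foldl (fun s ch => if PySem.Set.contains s ch then PySem.Set.discard s ch else PySem.Set.add s ch) s ↔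
      ((x ∈ s) ↔ l.count x % 2 = 0) := by
  induction l with
  | nil =>
    intro s hs
    refine ⟨hs, fun x => ?_⟩
    simp
  | cons a l ih =>
    intro s hs
    have hs' : (if PySem.Set.contains s a then PySem.Set.discard s a else PySem.Set.add s a).Nodup := by
      split_ifs
      · exact PySem.Set.nodup_discard s a hs
      · exact PySem.Set.nodup_add s a hs
    obtain ⟨hn, hm⟩ := ih _ hs'
    refine ⟨hn, fun x => ?_⟩
    rw [List.foldl_cons, hm x]
    have hcnt : (a :: l).count x = l.count x + (if a = x then 1 else 0) := by
      simp [List.count_cons]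
    by_cases hax : a = x
    · have hmem : (x ∈ if PySem.Set.contains s a then PySem.Set.discard s a else PySem.Set.add s a) ↔ ¬ (x ∈ s) := by
        rw [← hax]
        by_cases h : PySem.Set.contains s a = true
        · have hx := (PySem.Set.contains_iff s a).mp h
          rw [if_pos h, PySem.Set.mem_discard]
          simp [hx]
        · have hx : a ∉ s := fun hmem => h ((PySem.Set.contains_iff s a).mpr hmem)
          rw [if_neg h, PySem.Set.mem_add]
          simp [hx]
      rw [hmem, hcnt, if_pos hax]
      by_cases hx : x ∈ s <;> simp [hx] <;> omega
    · have hmem : (x ∈ if PySem.Set.contains s a then PySem.Set.discard s a else PySem.Set.add s a) ↔ x ∈ s := by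
        split_ifs
        · rw [PySem.Set.mem_discard]; exact ⟨fun h => h.1, fun h => ⟨h, fun e => hax e.symm⟩⟩
        · rw [PySem.Set.mem_add]; exact ⟨fun h => h.resolve_right (fun e => hax e.symm), Or.inl⟩
      rw [hmem, hcnt, if_neg hax]
      simp

-- the per-character arithmetic: 2 * Σ (cnt/2) + #odd = Σ cnt, over any list of keys
theorem pv_sum_half (cnt : Char → Nat) : ∀ (D : List Char),
    2 * (D.map (fun k => cnt k / 2)).sum + D.countP (fun k => cnt k % 2 == 1) = (D.map cnt).sum := by
  intro D
  induction D with
  | nil => simp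
  | cons a D ih =>
    simp only [List.map_cons, List.sum_cons, List.countP_cons]
    by_cases h : cnt a % 2 = 1 <;> simp [h] <;> omega

-- Σ over the distinct characters of their counts = length of the list
theorem pv_sum_counts (l : List Char) :
    ((PySem.Set.ofList l).map (fun k => l.count k)).sum = l.length := by
  have hperm : (PySem.Set.ofList l).Perm l.dedup := by
    rw [List.perm_ext_iff_of_nodup (PySem.Set.nodup_ofList l) l.nodup_dedup]
    intro a; rw [PySem.Set.mem_ofList, List.mem_dedup]
  calc ((PySem.Set.ofList l).map (fun k => l.count k)).sum
      = (l.dedup.map (fun k => l.count k)).sum := ((hperm.map _).sum_eq)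
    _ = l.length := List.sum_map_count_dedup_eq_length l

-- B's odd set has the same length as the odd-count filter of the distinct characters
theorem pv_odd_len (l : List Char) :
    (l.foldl (fun s ch => if PySem.Set.contains s ch then PySem.Set.discard s ch else PySem.Set.add s ch)
      ([] : PySem.Set Char)).length
      = ((PySem.Set.ofList l).filter (fun k => l.count k % 2 == 1)).length := by
  obtain ⟨hn, hm⟩ := pv_toggle_fold l [] List.nodup_nil
  have hperm : (l.foldl (fun s ch => if PySem.Set.contains s ch then PySem.Set.discard s ch else PySem.Set.add s ch)
      ([] : PySem.Set Char)).Perm ((PySem.Set.ofList l).filter (fun k => l.count k % 2 == 1)) := by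
    rw [List.perm_ext_iff_of_nodup hn ((PySem.Set.nodup_ofList l).filter _)]
    intro a
    rw [hm a, List.mem_filter, PySem.Set.mem_ofList]
    constructor
    · intro h
      have hodd : l.count a % 2 = 1 := by simp at h; omega
      have : a ∈ l := by
        rcases List.count_pos_iff.mp (by omega : 0 < l.count a) with h; exact h
      simp [this, hodd]
    · intro ⟨_, h⟩
      simp at h ⊢
      omega
  exact hperm.length_eq

theorem pv_main (l : List Char) :
    ((PySem.Set.ofList l).map (fun k => (l.count k : Nat) / 2)).sum
      = (l.length - ((PySem.Set.ofList l).filter (fun k => l.count k % 2 == 1)).length) / 2 := by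
  have h1 := pv_sum_half (fun k => l.count k) (PySem.Set.ofList l)
  have h2 := pv_sum_counts l
  have h3 : ((PySem.Set.ofList l).filter (fun k => l.count k % 2 == 1)).length
      = (PySem.Set.ofList l).countP (fun k => l.count k % 2 == 1) := List.countP_eq_length_filter.symm
  rw [h3]
  omega

-- ===== VERDICT (by name: the statement is the Claim_ definition above) =====
theorem find_minimum_moves_spec : Claim_equal_find_minimum_moves := by
  intro word _
  unfold Spec_find_minimum_moves find_minimum_moves find_minimum_moves_alt
  dsimp only
  set l := word.toList with hl
  -- A's side: the dict is counter l, its values are the counts of the distinct chars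
  rw [PySem.Dict.foldl_insert_getD_add_one_eq_counter l,
      PySem.Dict.values_eq_map_keys _ (PySem.Dict.nodup_keys_counter l) 0,
      PySem.Dict.keys_counter l, PySem.List.foldl_add, List.map_map]
  have hAmap : ((fun count => PySem.Int.floordiv count 2) ∘ fun k => (PySem.Dict.counter l).getD k 0)
      = fun k => ((l.count k / 2 : Nat) : Int) := by
    funext k
    simp only [Function.comp, PySem.Dict.getD_counter l k]
    exact_mod_cast PySem.Int.floordiv_natCast (l.count k) 2
  rw [hAmap]
  -- B's side
  rw [PySem.Str.len_eq]
  simp only [PySem.Set.len]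
  rw [pv_odd_len l]
  have hle : ((PySem.Set.ofList l).filter (fun k => l.count k % 2 == 1)).length ≤ l.length := by
    have h1 := pv_sum_half (fun k => l.count k) (PySem.Set.ofList l)
    have h2 := pv_sum_counts l
    have h3 : ((PySem.Set.ofList l).filter (fun k => l.count k % 2 == 1)).length
        = (PySem.Set.ofList l).countP (fun k => l.count k % 2 == 1) := List.countP_eq_length_filter.symm
    omega
  have hsub : (l.length : Int) - (((PySem.Set.ofList l).filter (fun k => l.count k % 2 == 1)).length : Int)
      = ((l.length - ((PySem.Set.ofList l).filter (fun k => l.count k % 2 == 1)).length : Nat) : Int) := by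
    omega
  rw [hsub]
  rw [show ((2 : Int) = ((2 : Nat) : Int)) from rfl, PySem.Int.floordiv_natCast]
  have hcast : ((PySem.Set.ofList l).map (fun k => ((l.count k / 2 : Nat) : Int))).sum
      = (((PySem.Set.ofList l).map (fun k => (l.count k / 2 : Nat))).sum : Int) := by
    rw [Nat.cast_list_sum, List.map_map]; rfl
  rw [hcast, pv_main l]
  simp
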